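-- pv_equiv track=rewrite | github.com/minjo1234/Progrmmers_Problems | LV1/Hamberger.py | solution
-- ===== SOURCE A (Python) =====
-- def solution(ingredient):
--     i=0
--     answer = 0
--     while i < len(ingredient) - 2 :
--             if ingredient[i:i+4] == [1, 2, 3, 1] :
--                 del ingredient[i:i+4]
--                 i = 0
--                 answer += 1
--                 continue
--             i += 1
--     return answer
-- ===== SOURCE B (Python) =====
-- def solution(ingredient):
--     # Return-value equivalent to A (A mutates its argument; B does not): stack pass.
--     stack = []
--     count = 0
--     for x in ingredient:
--         stack.append(x)
--         if stack[-4:] == [1, 2, 3, 1]: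
--             del stack[-4:]
--             count += 1
--     return count
-- ===== Notes on version B (the rewrite author's own statement) =====
-- stated objective: alternative
-- what changed: Replaced A's restart-from-zero scan with repeated slice deletion by a single left-to-right pass keeping a stack and popping a matched pattern off its top.
import Mathlib
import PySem

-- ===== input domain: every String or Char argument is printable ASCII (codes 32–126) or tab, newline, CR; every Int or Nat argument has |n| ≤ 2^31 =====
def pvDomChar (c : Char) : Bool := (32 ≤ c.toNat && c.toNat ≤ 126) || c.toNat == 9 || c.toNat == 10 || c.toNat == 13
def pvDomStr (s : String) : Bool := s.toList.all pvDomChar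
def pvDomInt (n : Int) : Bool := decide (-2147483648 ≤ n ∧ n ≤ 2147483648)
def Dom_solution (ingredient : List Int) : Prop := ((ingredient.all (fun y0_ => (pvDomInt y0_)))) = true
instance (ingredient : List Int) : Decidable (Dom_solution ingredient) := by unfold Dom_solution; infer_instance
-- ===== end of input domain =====

-- B replaces A's restart-from-zero rescans with a single stack pass (same measured cost here);
-- equivalence is about the RETURN value only — Python A mutates its argument, B does not.


-- ===== PORT A =====
-- while-loop of A: state (ingredient, i, answer); `del ingredient[i:i+4]` is take i ++ drop (i+4)
-- (exact for the nonnegative i the loop uses); slice test via PySem.List.slice.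
def solLoopA (ing : List Int) (i : Nat) (ans : Int) : Int :=
  if h1 : (i : Int) < PySem.List.len ing - 2 then
    if h2 : PySem.List.slice ing (some (i : Int)) (some ((i : Int) + 4)) = [1, 2, 3, 1] then
      solLoopA (ing.take i ++ ing.drop (i + 4)) 0 (ans + 1)
    else
      solLoopA ing (i + 1) ans
  else
    ans
termination_by (ing.length, ing.length - i)
decreasing_by
  · -- a match means i+4 ≤ length, so the list shrinks by 4
    have hs : (ing.drop i).take 4 = [1, 2, 3, 1] := by
      have : ((i : Int) + 4) = ((i + 4 : Nat) : Int) := by push_cast; ring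
      rw [this, PySem.List.slice_natCast] at h2
      simpa using h2
    have hile : i + 4 ≤ ing.length := by
      have h := congrArg List.length hs
      simp at h
      omega
    left
    simp only [List.length_append, List.length_take, List.length_drop]
    rw [Nat.min_eq_left (by omega)]
    omega
  · simp [PySem.List.len_eq] at h1
    right
    omega

def solution (ingredient : List Int) : Int := solLoopA ingredient 0 0

-- ===== PORT B =====
-- Source B: for x in ingredient: stack.append(x); if the top four match the pattern: pop them; count += 1
def runB (xs : List Int) (stack : List Int) (count : Int) : Int :=
  match xs with
  | [] => count
  | x :: rest =>
    let st' := stack ++ [x]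
    if PySem.List.slice st' (some (-4)) none = [1, 2, 3, 1] then
      runB rest (PySem.List.slice st' none (some (-4))) (count + 1)
    else
      runB rest st' count

def solution_alt (ingredient : List Int) : Int := runB ingredient [] 0

-- ===== PRECONDITION & SPEC =====
def Spec_solution (ingredient : List Int) (out : Int) : Prop := out = solution_alt ingredient
instance (ingredient : List Int) (out : Int) : Decidable (Spec_solution ingredient out) := by unfold Spec_solution; infer_instance

-- ===== CLAIM (what is proved, stated in full; the proofs are below) =====
def Claim_equal_solution : Prop := ∀ (ingredient : List Int), Dom_solution ingredient → Spec_solution ingredient (solution ingredient)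

-- ===== LEMMAS AND PROOFS =====

-- proof-side runner: B's stack pass returning (final stack, count)
def runP : List Int → List Int → (List Int × Int)
  | [], st => (st, 0)
  | x :: rest, st =>
    if (st ++ [x]).drop ((st ++ [x]).length - 4) = [1, 2, 3, 1] then
      let r := runP rest ((st ++ [x]).take ((st ++ [x]).length - 4))
      (r.1, r.2 + 1)
    else
      runP rest (st ++ [x])

lemma runB_eq_runP (xs : List Int) : ∀ (st : List Int) (c : Int),
    runB xs st c = c + (runP xs st).2 := by
  induction xs with
  | nil => intro st c; simp [runB, runP]
  | cons x rest ih =>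
    intro st c
    rw [runB, runP]
    have h4 : PySem.List.slice (st ++ [x]) (some (-4)) none = (st ++ [x]).drop ((st ++ [x]).length - 4) :=
      PySem.List.slice_from_neg_ofNat (st ++ [x]) 4 (by omega)
    have h4' : PySem.List.slice (st ++ [x]) none (some (-4)) = (st ++ [x]).take ((st ++ [x]).length - 4) :=
      PySem.List.slice_to_neg_ofNat (st ++ [x]) 4 (by omega)
    simp only [h4, h4']
    split
    · rw [ih]; ring
    · rw [ih]

lemma runP_append (u : List Int) : ∀ (v st : List Int),
    runP (u ++ v) st = ((runP v (runP u st).1).1, (runP u st).2 + (runP v (runP u st).1).2) := by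
  induction u with
  | nil => intro v st; simp [runP]
  | cons x rest ih =>
    intro v st
    rw [List.cons_append, runP, runP]
    split
    · simp only []
      rw [ih]
      simp only [Prod.mk.injEq]
      exact ⟨trivial, by ring⟩
    · rw [ih]

-- a window fully inside a prefix reads the same in the longer list
lemma prefix_window (w t : List Int) (j : Nat) (h : j + 4 ≤ w.length) :
    ((w ++ t).drop j).take 4 = (w.drop j).take 4 := by
  rw [List.drop_append_of_le_length (by omega)]
  exact List.take_append_of_le_length (by simp [List.length_drop]; omega)

-- if no window of st ++ u equals the pattern, the stack pass just pushes everything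
lemma runP_no_occ (u : List Int) : ∀ (st : List Int),
    (∀ j, j + 4 ≤ (st ++ u).length → ((st ++ u).drop j).take 4 ≠ [1, 2, 3, 1]) →
    runP u st = (st ++ u, 0) := by
  induction u with
  | nil => intro st _; simp [runP]
  | cons x rest ih =>
    intro st H
    rw [runP]
    have hne : (st ++ [x]).drop ((st ++ [x]).length - 4) ≠ [1, 2, 3, 1] := by
      by_cases hlen : 4 ≤ (st ++ [x]).length
      · set j := (st ++ [x]).length - 4 with hj
        have hwin : (((st ++ [x]) ++ rest).drop j).take 4 = ((st ++ [x]).drop j).take 4 :=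
          prefix_window _ _ _ (by omega)
        have htake : ((st ++ [x]).drop j).take 4 = (st ++ [x]).drop j := by
          apply List.take_of_length_le
          simp only [List.length_drop]
          omega
        have hjb : j + 4 ≤ (st ++ x :: rest).length := by
          have e1 : (st ++ [x]).length = st.length + 1 := by simp
          have e2 : (st ++ x :: rest).length = st.length + 1 + rest.length := by simp; omega
          omega
        have := H j hjb
        rw [show st ++ x :: rest = (st ++ [x]) ++ rest by simp] at this
        rw [hwin, htake] at this
        exact this
      · intro hc
        have hlc := congrArg List.length hc
        simp only [List.length_drop] at hlc
        simp only [not_le] at hlen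
        simp only [List.length_cons, List.length_nil] at hlc
        omega
    rw [if_neg hne]
    have := ih (st ++ [x]) (by
      intro j hj
      have : (st ++ [x]) ++ rest = st ++ x :: rest := by simp
      rw [this] at hj ⊢
      exact H j hj)
    rw [this]
    simp

-- the key descent: removing the leftmost occurrence (at position |u|, nothing earlier) costs exactly one pop
lemma runP_cnt_match (u v : List Int)
    (H : ∀ j, j < u.length → ((u ++ [1, 2, 3, 1] ++ v).drop j).take 4 ≠ [1, 2, 3, 1]) :
    (runP (u ++ [1, 2, 3, 1] ++ v) []).2 = 1 + (runP (u ++ v) []).2 := by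
  have hu : runP u [] = (u, 0) := by
    apply runP_no_occ
    intro j hj
    simp only [List.nil_append] at hj ⊢
    have hw : (((u) ++ ([1, 2, 3, 1] ++ v)).drop j).take 4 = (u.drop j).take 4 :=
      prefix_window _ _ _ (by omega)
    have := H j (by omega)
    rw [List.append_assoc] at this
    rw [hw] at this
    exact this
  have hw3 : runP (u ++ [1, 2, 3]) [] = (u ++ [1, 2, 3], 0) := by
    apply runP_no_occ
    intro j hj
    simp only [List.nil_append, List.length_append] at hj
    have hfull : u ++ [1, 2, 3, 1] ++ v = (u ++ [1, 2, 3]) ++ ([1] ++ v) := by simp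
    have hw : (((u ++ [1, 2, 3]) ++ ([1] ++ v)).drop j).take 4 = ((u ++ [1, 2, 3]).drop j).take 4 :=
      prefix_window _ _ _ (by simp at hj ⊢; omega)
    have := H j (by simp at hj; omega)
    rw [hfull, hw] at this
    exact this
  -- left side: split as (u ++ [1,2,3]) ++ ([1] ++ v)
  have hsplit : u ++ [1, 2, 3, 1] ++ v = (u ++ [1, 2, 3]) ++ ([1] ++ v) := by simp
  rw [hsplit, runP_append, hw3]
  -- first step on [1] ++ v from stack u ++ [1,2,3]: push 1, top four match, pop back to u
  have hstep : runP ([1] ++ v) (u ++ [1, 2, 3]) = ((runP v u).1, (runP v u).2 + 1) := by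
    rw [List.singleton_append, runP]
    have hlist : (u ++ [1, 2, 3]) ++ [1] = u ++ [1, 2, 3, 1] := by simp
    have hlen : ((u ++ [1, 2, 3]) ++ [1]).length - 4 = u.length := by
      simp [List.length_append]
    have hdrop : ((u ++ [1, 2, 3]) ++ [1]).drop (((u ++ [1, 2, 3]) ++ [1]).length - 4) = [1, 2, 3, 1] := by
      rw [hlen, hlist]
      exact List.drop_left
    rw [if_pos hdrop]
    have htake : ((u ++ [1, 2, 3]) ++ [1]).take (((u ++ [1, 2, 3]) ++ [1]).length - 4) = u := by
      rw [hlen, hlist]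
      exact List.take_left
    rw [htake]
  rw [hstep]
  -- right side
  rw [runP_append, hu]
  simp [add_comm]

-- main invariant: at state (ing, i, ans) with no window matching before i, A's loop
-- returns ans plus B's stack count of ing
lemma solLoopA_eq (ing : List Int) (i : Nat) (ans : Int)
    (H : ∀ j, j < i → ((ing.drop j).take 4) ≠ [1, 2, 3, 1]) :
    solLoopA ing i ans = ans + (runP ing []).2 := by
  induction ing, i, ans using solLoopA.induct with
  | case1 ing i ans h1 h2 ih =>
    -- match at i: decompose ing = u ++ [1,2,3,1] ++ v
    have hs : (ing.drop i).take 4 = [1, 2, 3, 1] := by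
      have hc : ((i : Int) + 4) = ((i + 4 : Nat) : Int) := by push_cast; ring
      rw [hc, PySem.List.slice_natCast] at h2
      simpa using h2
    have hilen : i + 2 < ing.length := by
      simp [PySem.List.len_eq] at h1; omega
    have hdec : ing = ing.take i ++ [1, 2, 3, 1] ++ ing.drop (i + 4) := by
      conv_lhs => rw [← List.take_append_drop i ing]
      rw [← hs]
      rw [List.append_assoc]
      congr 1
      rw [show ing.drop (i + 4) = (ing.drop i).drop 4 by simp [List.drop_drop, Nat.add_comm i 4]]
      exact (List.take_append_drop 4 (ing.drop i)).symm
    have hulen : (ing.take i).length = i := by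
      simp [List.length_take]; omega
    have hcnt : (runP ing []).2 = 1 + (runP (ing.take i ++ ing.drop (i + 4)) []).2 := by
      conv_lhs => rw [hdec]
      apply runP_cnt_match
      intro j hj
      rw [← hdec]
      exact H j (by omega)
    rw [solLoopA, dif_pos h1, dif_pos h2]
    rw [ih (by intro j hj; omega)]
    rw [hcnt]
    ring
  | case2 ing i ans h1 h2 ih =>
    rw [solLoopA, dif_pos h1, dif_neg h2]
    apply ih
    intro j hj
    rcases Nat.lt_or_ge j i with hji | hji
    · exact H j hji
    · have hji' : j = i := by omega
      subst hji'
      intro hc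
      apply h2
      have hcast : ((j : Int) + 4) = ((j + 4 : Nat) : Int) := by push_cast; ring
      rw [hcast, PySem.List.slice_natCast]
      simpa using hc
  | case3 ing i ans h1 =>
    rw [solLoopA, dif_neg h1]
    have hlen : ing.length ≤ i + 2 := by
      simp [PySem.List.len_eq] at h1; omega
    have : runP ing [] = (ing, 0) := by
      have := runP_no_occ ing [] (by
        intro j hj
        simp only [List.nil_append] at hj ⊢
        exact H j (by omega))
      simpa using this
    rw [this]
    simp

-- ===== VERDICT (by name: the statement is the Claim_ definition above) =====
theorem solution_spec : Claim_equal_solution := by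
  intro ing _
  unfold Spec_solution solution solution_alt
  rw [runB_eq_runP]
  rw [solLoopA_eq ing 0 0 (by intro j hj; omega)]
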